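-- pv_equiv track=rewrite | github.com/biepes/reducer-tool | server/app/data_process_analysis/representative_counters/rp_count.py | __get_sliced_groups
-- ===== SOURCE A (Python) =====
-- def __get_sliced_groups(g1, g2):
--     groups = list()
--
--     for i in range(len(g1)):
--         for j in range(len(g2)):
--             if (len(g1[i]) > 0) and (len(g2[j]) > 0):
--                 intersection = g1[i] & g2[j]
--                 if (len(intersection) > 0):
--                     g1[i] -= intersection
--                     g2[j] -= intersection
--                     groups.append(intersection)
--
--     for i in range(len(g1)):
--         if len(g1[i]) > 0:
--             groups.append(g1[i])
--
--     for i in range(len(g2)):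
--         if len(g2[i]) > 0:
--             groups.append(g2[i])
--
--     return groups
-- ===== SOURCE B (Python) =====
-- def __get_sliced_groups(g1, g2):
--     # Index every element by its list of g2 positions; pair each g1 occurrence
--     # with the element's next unused g2 position, bucket rows by that position.
--     occ = {}
--     for j, t in enumerate(g2):
--         for x in t:
--             occ.setdefault(x, []).append(j)
--     for x in occ:
--         occ[x].reverse()          # smallest position at the end -> O(1) pop()
--
--     groups, rests = [], []
--     for s in g1:
--         buckets = {}
--         rest = set()
--         for x in s:
--             js = occ.get(x)
--             if js:
--                 j = js.pop()
--                 buckets.setdefault(j, set()).add(x)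
--             else:
--                 rest.add(x)
--         for j in sorted(buckets):
--             groups.append(buckets[j])
--         if rest:
--             rests.append(rest)
--
--     groups.extend(rests)
--
--     for j, t in enumerate(g2):
--         r = {x for x in t if j in occ.get(x, ())}
--         if r:
--             groups.append(r)
--     return groups
-- ===== Notes on version B (the rewrite author's own statement) =====
-- stated objective: faster
-- what changed: A repeatedly intersects every g1 set with every g2 set while mutating both; B builds one index from each element to its list of g2 positions, then pairs each g1 occurrence of an element with the element's next unused g2 position in a single pass, bucketing rows by position and reading all leftovers off the index.
import Mathlib
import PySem

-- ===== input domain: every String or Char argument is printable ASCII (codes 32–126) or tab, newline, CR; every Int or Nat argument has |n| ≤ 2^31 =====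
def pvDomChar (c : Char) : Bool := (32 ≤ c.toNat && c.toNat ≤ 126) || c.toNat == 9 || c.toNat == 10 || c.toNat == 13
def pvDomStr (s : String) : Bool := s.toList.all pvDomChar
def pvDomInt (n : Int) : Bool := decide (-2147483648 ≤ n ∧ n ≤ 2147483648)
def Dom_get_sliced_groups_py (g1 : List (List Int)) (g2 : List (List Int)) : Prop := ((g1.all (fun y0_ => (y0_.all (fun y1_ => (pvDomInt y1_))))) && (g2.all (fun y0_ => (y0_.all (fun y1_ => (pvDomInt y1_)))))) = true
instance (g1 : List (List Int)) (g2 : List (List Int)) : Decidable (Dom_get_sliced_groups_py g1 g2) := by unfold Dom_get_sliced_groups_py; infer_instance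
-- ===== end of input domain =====

-- B replaces A's all-pairs set intersections by a one-time index of each element's g2
-- positions, pairing every g1 occurrence with the element's next unused g2 position
-- (objective: faster). A mutates its set arguments in place; B does not — the
-- equivalence proved here is about the RETURN value only.

-- ===== PORT A =====
-- inner loop 'for j in range(len(g2))': peeling one row s against the list of g2 sets;
-- the in-place mutation of g1[i] / g2[j] is carried as explicit state.
def rowA (s : List Int) (b : List (List Int)) :
    List Int × List (List Int) × List (List Int) :=
  match b with
  | [] => (s, [], [])
  | t :: bs =>
    if 0 < s.length ∧ 0 < t.length then
      let inter := PySem.Set.inter s t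
      if 0 < inter.length then
        let r := rowA (PySem.Set.diff s inter) bs
        (r.1, PySem.Set.diff t inter :: r.2.1, inter :: r.2.2)
      else
        let r := rowA s bs
        (r.1, t :: r.2.1, r.2.2)
    else
      let r := rowA s bs
      (r.1, t :: r.2.1, r.2.2)

-- outer loop 'for i in range(len(g1))'; returns (g1 residuals, g2 residuals, groups)
def mainA (a : List (List Int)) (b : List (List Int)) :
    List (List Int) × List (List Int) × List (List Int) :=
  match a with
  | [] => ([], b, [])
  | s :: rest =>
    let r := rowA s b
    let m := mainA rest r.2.1
    (r.1 :: m.1, m.2.1, r.2.2 ++ m.2.2)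

def get_sliced_groups_py (g1 : List (List Int)) (g2 : List (List Int)) : List (List Int) :=
  let a := g1.map PySem.Set.ofList
  let b := g2.map PySem.Set.ofList
  let m := mainA a b
  m.2.2 ++ m.1.filter (fun s => 0 < s.length) ++ m.2.1.filter (fun t => 0 < t.length)

-- ===== PORT B =====
-- 'for j, t in enumerate(g2): for x in t: occ.setdefault(x, []).append(j)'
def buildOcc (ts : List (List Int)) (j : Int) (occ : PySem.Dict Int (List Int)) :
    PySem.Dict Int (List Int) :=
  match ts with
  | [] => occ
  | t :: rest =>
    buildOcc rest (j + 1) (t.foldl (fun d x => d.insert x (d.getD x [] ++ [j])) occ)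

-- 'for x in s: js = occ.get(x); if js: j = js.pop(); buckets.setdefault(j, set()).add(x)
--  else: rest.add(x)'  — js.pop() on the (guarded) nonempty list is getLast! / dropLast
def rowB (s : List Int) (occ : PySem.Dict Int (List Int)) :
    PySem.Dict Int (List Int) × PySem.Dict Int (List Int) × List Int :=
  s.foldl
    (fun st x =>
      let js := st.1.getD x []
      if js ≠ [] then
        let j := js.getLast!
        (st.1.insert x js.dropLast,
         st.2.1.insert j (PySem.Set.add (st.2.1.getD j []) x), st.2.2)
      else
        (st.1, st.2.1, PySem.Set.add st.2.2 x))
    (occ, PySem.Dict.empty, [])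

-- 'for s in g1: … ; for j in sorted(buckets): groups.append(buckets[j]); if rest: rests.append(rest)'
def mainB (a : List (List Int)) (occ : PySem.Dict Int (List Int)) :
    PySem.Dict Int (List Int) × List (List Int) × List (List Int) :=
  match a with
  | [] => (occ, [], [])
  | s :: rest =>
    let r := rowB s occ
    let gs := (PySem.List.sorted r.2.1.keys (fun j => j) false).map (fun j => r.2.1.getD j [])
    let m := mainB rest r.1
    (m.1, gs ++ m.2.1, (if 0 < r.2.2.length then [r.2.2] else []) ++ m.2.2)

-- 'for j, t in enumerate(g2): r = {x for x in t if j in occ.get(x, ())}; if r: groups.append(r)'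
def tailsB (ts : List (List Int)) (j : Int) (occ : PySem.Dict Int (List Int)) :
    List (List Int) :=
  match ts with
  | [] => []
  | t :: rest =>
    let r := t.filter (fun x => decide (j ∈ occ.getD x []))
    (if 0 < r.length then [r] else []) ++ tailsB rest (j + 1) occ

def get_sliced_groups_py_alt (g1 : List (List Int)) (g2 : List (List Int)) : List (List Int) :=
  let b := g2.map PySem.Set.ofList
  let occ0 := buildOcc b 0 PySem.Dict.empty
  -- 'for x in occ: occ[x].reverse()'
  let occ1 := occ0.keys.foldl (fun d x => d.insert x (d.getD x []).reverse) occ0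
  let m := mainB (g1.map PySem.Set.ofList) occ1
  m.2.1 ++ m.2.2 ++ tailsB b 0 m.1

-- ===== PRECONDITION & SPEC =====
def Spec_get_sliced_groups_py (g1 : List (List Int)) (g2 : List (List Int)) (out : List (List Int)) : Prop := out = get_sliced_groups_py_alt g1 g2
instance (g1 : List (List Int)) (g2 : List (List Int)) (out : List (List Int)) : Decidable (Spec_get_sliced_groups_py g1 g2 out) := by unfold Spec_get_sliced_groups_py; infer_instance

-- ===== CLAIM (what is proved, stated in full; the proofs are below) =====
def Claim_equal_get_sliced_groups_py : Prop := ∀ (g1 : List (List Int)) (g2 : List (List Int)), Dom_get_sliced_groups_py g1 g2 → Spec_get_sliced_groups_py g1 g2 (get_sliced_groups_py g1 g2)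

-- ===== LEMMAS AND PROOFS =====

-- `occD occ x`: the list stored for x (Python's occ.get(x, []))
def occD (occ : PySem.Dict Int (List Int)) (x : Int) : List Int := occ.getD x []

-- ascending list of the positions (counted from j) of the sets in ts that contain x
def asc (x : Int) (j : Int) : List (List Int) → List Int
  | [] => []
  | t :: ts => (if x ∈ t then [j] else []) ++ asc x (j + 1) ts

-- "x's next unused g2 position is j"
def tgt (occ : PySem.Dict Int (List Int)) (j : Int) (y : Int) : Bool :=
  decide (occD occ y ≠ [] ∧ (occD occ y).getLast! = j)

def Kset (s : List Int) (occ : PySem.Dict Int (List Int)) (j : Int) : List Int :=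
  s.filter (tgt occ j)

-- what one row of A leaves of the g2 state
def peel (s : List Int) (occ : PySem.Dict Int (List Int)) (j : Int) :
    List (List Int) → List (List Int)
  | [] => []
  | t :: ts => t.filter (fun y => !(decide (y ∈ s) && tgt occ j y)) :: peel s occ (j + 1) ts

-- the groups one row of A emits, in ascending position order
def emits (s : List Int) (occ : PySem.Dict Int (List Int)) (j : Int) :
    List (List Int) → List (List Int)
  | [] => []
  | _ :: ts => (if Kset s occ j ≠ [] then [Kset s occ j] else []) ++ emits s occ (j + 1) ts

-- the positions of the groups one row emits
def keysL (s : List Int) (occ : PySem.Dict Int (List Int)) (j : Int) :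
    List (List Int) → List Int
  | [] => []
  | _ :: ts => (if Kset s occ j ≠ [] then [j] else []) ++ keysL s occ (j + 1) ts

-- the pointwise residual of the original g2 determined by occ
def residF (occ : PySem.Dict Int (List Int)) (j : Int) : List (List Int) → List (List Int)
  | [] => []
  | t :: ts => t.filter (fun x => decide (j ∈ occ.getD x [])) :: residF occ (j + 1) ts


-- ---- generic list helpers ----

theorem pvConcat_getLast! (l : List Int) (h : l ≠ []) : l.dropLast ++ [l.getLast!] = l := by
  obtain ⟨tl, a, rfl⟩ := List.eq_nil_or_concat l |>.resolve_left h
  simp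

theorem pvGetLast!_def (l : List Int) : l.getLast! = l.getLast?.getD 0 := by
  cases l <;> simp

theorem pvGetLast!_mem (l : List Int) (h : l ≠ []) : l.getLast! ∈ l := by
  obtain ⟨tl, a, rfl⟩ := List.eq_nil_or_concat l |>.resolve_left h
  simp [List.concat_eq_append]

theorem pvMem_dropLast_iff (l : List Int) (hnd : l.Nodup) (h : l ≠ []) (k : Int) :
    k ∈ l.dropLast ↔ k ∈ l ∧ k ≠ l.getLast! := by
  obtain ⟨tl, a, rfl⟩ := List.eq_nil_or_concat l |>.resolve_left h
  simp only [List.concat_eq_append] at hnd h ⊢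
  have ha : (tl ++ [a]).getLast! = a := by simp
  have hnotin : a ∉ tl := by
    rw [List.nodup_append] at hnd
    intro hmem
    exact hnd.2.2 a hmem a (by simp) rfl
  rw [ha, List.dropLast_concat]
  constructor
  · intro hk
    exact ⟨List.mem_append_left _ hk, fun hEq => hnotin (hEq ▸ hk)⟩
  · rintro ⟨hk, hne⟩
    rcases List.mem_append.mp hk with h1 | h1
    · exact h1
    · simp at h1; exact absurd h1 hne

-- ---- asc facts ----

theorem asc_bounds : ∀ (ts : List (List Int)) (x j k : Int), k ∈ asc x j ts →
    j ≤ k ∧ k < j + ts.length := by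
  intro ts
  induction ts with
  | nil => intro x j k hk; simp [asc] at hk
  | cons t ts ih =>
    intro x j k hk
    simp only [asc, List.mem_append] at hk
    rcases hk with hk | hk
    · by_cases hxt : x ∈ t
      · simp [hxt] at hk
        simp only [List.length_cons]
        omega
      · simp [hxt] at hk
    · have := ih x (j+1) k hk
      simp only [List.length_cons]
      omega

theorem asc_pairwise : ∀ (ts : List (List Int)) (x j : Int), (asc x j ts).Pairwise (· < ·) := by
  intro ts
  induction ts with
  | nil => intro x j; simp [asc]
  | cons t ts ih =>
    intro x j
    simp only [asc]
    split
    · simp only [List.singleton_append, List.pairwise_cons]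
      refine ⟨fun k hk => ?_, ih x (j+1)⟩
      have := asc_bounds ts x (j+1) k hk
      omega
    · simpa using ih x (j+1)

theorem asc_nodup (ts : List (List Int)) (x j : Int) : (asc x j ts).Nodup :=
  (asc_pairwise ts x j).imp (fun h => ne_of_lt h)

theorem asc_residF (occ : PySem.Dict Int (List Int)) :
    ∀ (ts : List (List Int)) (x j : Int),
    asc x j (residF occ j ts) = (asc x j ts).filter (fun k => decide (k ∈ occD occ x)) := by
  intro ts
  induction ts with
  | nil => intro x j; simp [asc, residF]
  | cons t ts ih =>
    intro x j
    simp only [residF, asc, List.filter_append, ih x (j+1)]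
    congr 1
    by_cases hxt : x ∈ t
    · by_cases hj : j ∈ occ.getD x []
      · simp [hxt, hj, List.mem_filter, occD]
      · simp [hxt, hj, List.mem_filter, occD]
    · simp [hxt, List.mem_filter]

theorem residF_self (occ : PySem.Dict Int (List Int)) :
    ∀ (ts : List (List Int)) (j : Int), (∀ x k, k ∈ asc x j ts → k ∈ occD occ x) →
    residF occ j ts = ts := by
  intro ts
  induction ts with
  | nil => intro j h; simp [residF]
  | cons t ts ih =>
    intro j h
    simp only [residF]
    refine List.cons_eq_cons.mpr ⟨?_, ?_⟩
    · apply List.filter_eq_self.mpr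
      intro x hx
      simp only [decide_eq_true_eq, occD] at *
      exact h x j (by simp [asc, hx])
    · exact ih (j+1) (fun x k hk => h x k (by simp only [asc, List.mem_append]; right; exact hk))

-- ---- invariants ----

def I1 (B : List (List Int)) (occ : PySem.Dict Int (List Int)) : Prop :=
  ∀ x, ∃ pre, asc x 0 B = pre ++ (occD occ x).reverse

theorem occD_nodup {B : List (List Int)} {occ : PySem.Dict Int (List Int)} (h : I1 B occ)
    (x : Int) : (occD occ x).Nodup := by
  obtain ⟨pre, hpre⟩ := h x
  have := asc_nodup B x 0
  rw [hpre, List.nodup_append] at this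
  exact List.nodup_reverse.mp this.2.1

theorem hs_of_inv {B : List (List Int)} {occ : PySem.Dict Int (List Int)} (h : I1 B occ)
    (x : Int) : (occD occ x).reverse = asc x 0 (residF occ 0 B) := by
  obtain ⟨pre, hpre⟩ := h x
  have hnd := asc_nodup B x 0
  rw [hpre, List.nodup_append] at hnd
  rw [asc_residF occ B x 0, hpre, List.filter_append]
  have h1 : pre.filter (fun k => decide (k ∈ occD occ x)) = [] := by
    apply List.filter_eq_nil_iff.mpr
    intro k hk
    simp only [decide_eq_true_eq]
    intro hmem
    exact hnd.2.2 k hk k (List.mem_reverse.mpr hmem) rfl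
  have h2 : (occD occ x).reverse.filter (fun k => decide (k ∈ occD occ x)) =
      (occD occ x).reverse := by
    apply List.filter_eq_self.mpr
    intro k hk
    simp only [decide_eq_true_eq]
    exact List.mem_reverse.mp hk
  rw [h1, h2, List.nil_append]

-- ---- congruence under removing one target from s ----

theorem tgt_unique {occ : PySem.Dict Int (List Int)} {j j' y : Int}
    (h : tgt occ j y = true) (h' : tgt occ j' y = true) : j = j' := by
  simp only [tgt, decide_eq_true_eq] at h h'
  omega

theorem Kset_filter_ne (s : List Int) (occ : PySem.Dict Int (List Int)) {j j' : Int}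
    (hne : j ≠ j') : Kset (s.filter (fun y => !(tgt occ j y))) occ j' = Kset s occ j' := by
  unfold Kset
  rw [List.filter_filter]
  apply List.filter_congr
  intro y _
  by_cases h' : tgt occ j' y = true
  · have hj : tgt occ j y = false := by
      rcases Bool.eq_false_or_eq_true (tgt occ j y) with h | h
      · exact absurd (tgt_unique h h') hne
      · exact h
    simp [h', hj]
  · simp only [Bool.not_eq_true] at h'
    simp [h']

theorem keysL_filter_ne (s : List Int) (occ : PySem.Dict Int (List Int)) (j : Int) :
    ∀ (ts : List (List Int)) (j' : Int), j < j' →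
    keysL (s.filter (fun y => !(tgt occ j y))) occ j' ts = keysL s occ j' ts := by
  intro ts
  induction ts with
  | nil => intro j' _; simp [keysL]
  | cons t ts ih =>
    intro j' h
    simp only [keysL, Kset_filter_ne s occ (show j ≠ j' by omega), ih (j' + 1) (by omega)]

theorem peel_filter_ne (s : List Int) (occ : PySem.Dict Int (List Int)) (j : Int) :
    ∀ (ts : List (List Int)) (j' : Int), j < j' →
    peel (s.filter (fun y => !(tgt occ j y))) occ j' ts = peel s occ j' ts := by
  intro ts
  induction ts with
  | nil => intro j' _; simp [peel]
  | cons t ts ih =>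
    intro j' h
    simp only [peel, ih (j' + 1) (by omega)]
    congr 1
    apply List.filter_congr
    intro y _
    by_cases h' : tgt occ j' y = true
    · have hj : tgt occ j y = false := by
        rcases Bool.eq_false_or_eq_true (tgt occ j y) with hb | hb
        · exact absurd (tgt_unique hb h') (show j ≠ j' by omega)
        · exact hb
      simp [h', hj, List.mem_filter]
    · simp only [Bool.not_eq_true] at h'
      simp [h']

theorem emits_eq_map_keysL (s : List Int) (occ : PySem.Dict Int (List Int)) :
    ∀ (ts : List (List Int)) (j : Int),
    emits s occ j ts = (keysL s occ j ts).map (Kset s occ) := by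
  intro ts
  induction ts with
  | nil => intro j; simp [emits, keysL]
  | cons t ts ih =>
    intro j
    simp only [emits, keysL, ih (j + 1), List.map_append]
    congr 1
    split <;> simp

-- ---- keysL: the sorted bucket keys ----

theorem mem_keysL (s : List Int) (occ : PySem.Dict Int (List Int)) :
    ∀ (ts : List (List Int)) (j k : Int),
    k ∈ keysL s occ j ts ↔ Kset s occ k ≠ [] ∧ j ≤ k ∧ k < j + ts.length := by
  intro ts
  induction ts with
  | nil =>
    intro j k
    simp only [keysL, List.length_nil]
    constructor
    · intro h; simp at h
    · rintro ⟨_, h1, h2⟩; omega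
  | cons t ts ih =>
    intro j k
    simp only [keysL, List.mem_append, ih (j + 1)]
    constructor
    · rintro (hk | hk)
      · by_cases hK : Kset s occ j ≠ []
        · simp [hK] at hk
          subst hk
          refine ⟨hK, by omega, ?_⟩
          simp only [List.length_cons]
          push_cast
          omega
        · simp [hK] at hk
      · refine ⟨hk.1, by omega, ?_⟩
        have := hk.2.2
        simp only [List.length_cons]
        push_cast at this ⊢
        omega
    · rintro ⟨hKs, hb1, hb2⟩
      by_cases hkj : k = j
      · subst hkj
        left
        simp [hKs]
      · right
        refine ⟨hKs, by omega, ?_⟩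
        simp only [List.length_cons] at hb2
        push_cast at hb2 ⊢
        omega

theorem keysL_pairwise (s : List Int) (occ : PySem.Dict Int (List Int)) :
    ∀ (ts : List (List Int)) (j : Int), (keysL s occ j ts).Pairwise (· < ·) := by
  intro ts
  induction ts with
  | nil => intro j; simp [keysL]
  | cons t ts ih =>
    intro j
    simp only [keysL]
    split
    · simp only [List.singleton_append, List.pairwise_cons]
      refine ⟨fun k hk => ?_, ih (j + 1)⟩
      have := (mem_keysL s occ ts (j + 1) k).mp hk
      omega
    · simpa using ih (j + 1)

-- ---- the A row ----

theorem rowA_spec (occ : PySem.Dict Int (List Int)) :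
    ∀ (bs : List (List Int)) (j : Int) (s : List Int),
    (∀ x ∈ s, (occD occ x).reverse = asc x j bs) →
    rowA s bs = (s.filter (fun y => decide (occD occ y = [])), peel s occ j bs, emits s occ j bs) := by
  intro bs
  induction bs with
  | nil =>
    intro j s hs
    simp only [rowA, peel, emits]
    have : s.filter (fun y => decide (occD occ y = [])) = s := by
      apply List.filter_eq_self.mpr
      intro y hy
      have h := hs y hy
      simp only [asc] at h
      simp [List.reverse_eq_nil_iff.mp h]
    rw [this]
  | cons t ts ih =>
    intro j s hs
    have F1 : ∀ y ∈ s, (y ∈ t ↔ tgt occ j y = true) := by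
      intro y hy
      have hrev := hs y hy
      simp only [asc] at hrev
      constructor
      · intro hyt
        rw [if_pos hyt] at hrev
        have hocc : occD occ y = (asc y (j + 1) ts).reverse ++ [j] := by
          have := congrArg List.reverse hrev
          simpa using this
        simp [tgt, hocc]
      · intro htgt
        by_contra hyt
        rw [if_neg hyt, List.nil_append] at hrev
        simp only [tgt, decide_eq_true_eq] at htgt
        rcases htgt with ⟨hne, hlast⟩
        have hjmem : j ∈ occD occ y := by
          have hmem : (occD occ y).getLast! ∈ occD occ y := pvGetLast!_mem _ hne
          rwa [hlast] at hmem
        have hjasc : j ∈ asc y (j + 1) ts := by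
          rw [← hrev]
          simpa using hjmem
        have := asc_bounds ts y (j + 1) j hjasc
        omega
    have hKt : PySem.Set.inter s t = Kset s occ j := by
      rw [show PySem.Set.inter s t = s.filter (fun y => decide (y ∈ t)) from by
        simp [PySem.Set.inter]]
      unfold Kset
      apply List.filter_congr
      intro y hy
      by_cases hyt : y ∈ t
      · simp [hyt, (F1 y hy).mp hyt]
      · have htf : tgt occ j y = false := by
          rcases Bool.eq_false_or_eq_true (tgt occ j y) with hb | hb
          · exact absurd ((F1 y hy).mpr hb) hyt
          · exact hb
        simp [hyt, htf]
    by_cases hguard : 0 < s.length ∧ 0 < t.length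
    · by_cases hinter : 0 < (PySem.Set.inter s t).length
      · have hKne : Kset s occ j ≠ [] := by
          rw [← hKt]
          intro h
          rw [h] at hinter
          simp at hinter
        have hdiff : PySem.Set.diff s (PySem.Set.inter s t) =
            s.filter (fun y => !(tgt occ j y)) := by
          rw [show PySem.Set.diff s (PySem.Set.inter s t) =
              s.filter (fun y => !(decide (y ∈ PySem.Set.inter s t))) from by
            simp [PySem.Set.diff]]
          apply List.filter_congr
          intro y hy
          rw [hKt]
          by_cases htg : tgt occ j y = true
          · simp [htg, Kset, List.mem_filter, hy]
          · simp only [Bool.not_eq_true] at htg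
            simp [htg, Kset, List.mem_filter]
        have hs' : ∀ x ∈ s.filter (fun y => !(tgt occ j y)),
            (occD occ x).reverse = asc x (j + 1) ts := by
          intro x hx
          rw [List.mem_filter] at hx
          have hxs := hx.1
          have hnt : x ∉ t := by
            intro hxt
            have := (F1 x hxs).mp hxt
            simp [this] at hx
          have := hs x hxs
          simpa [asc, hnt] using this
        have IH := ih (j + 1) _ hs'
        simp only [rowA, if_pos hguard, if_pos hinter, IH, hdiff]
        simp only [Prod.mk.injEq]
        refine ⟨?_, ?_, ?_⟩
        · rw [List.filter_filter]
          apply List.filter_congr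
          intro y _
          by_cases hocc0 : occD occ y = []
          · have : tgt occ j y = false := by simp [tgt, hocc0]
            simp [hocc0, this]
          · simp [hocc0]
        · refine List.cons_eq_cons.mpr ⟨?_, ?_⟩
          · rw [show PySem.Set.diff t (PySem.Set.inter s t) =
                t.filter (fun y => !(decide (y ∈ PySem.Set.inter s t))) from by
              simp [PySem.Set.diff]]
            apply List.filter_congr
            intro y _
            rw [hKt]
            by_cases hys : y ∈ s
            · by_cases htg : tgt occ j y = true
              · simp [hys, htg, Kset, List.mem_filter]
              · simp only [Bool.not_eq_true] at htg
                simp [htg, Kset, List.mem_filter]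
            · have : y ∉ Kset s occ j := by
                intro hmem
                exact hys (List.mem_of_mem_filter hmem)
              simp [hys, this]
          · exact peel_filter_ne s occ j ts (j + 1) (by omega)
        · have hemit : emits (s.filter (fun y => !(tgt occ j y))) occ (j + 1) ts =
              emits s occ (j + 1) ts := by
            rw [emits_eq_map_keysL, emits_eq_map_keysL,
              keysL_filter_ne s occ j ts (j + 1) (by omega)]
            apply List.map_congr_left
            intro k hk
            have := (mem_keysL s occ ts (j + 1) k).mp hk
            exact Kset_filter_ne s occ (show j ≠ k by omega)
          simp only [emits, hemit, hKt]
          rw [if_pos hKne]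
          simp
      · have hK0 : Kset s occ j = [] := by
          rw [← hKt]
          exact List.length_eq_zero_iff.mp (by omega)
        have hs' : ∀ x ∈ s, (occD occ x).reverse = asc x (j + 1) ts := by
          intro x hx
          have hnt : x ∉ t := by
            intro hxt
            have hmem : x ∈ Kset s occ j := by
              unfold Kset
              rw [List.mem_filter]
              exact ⟨hx, (F1 x hx).mp hxt⟩
            rw [hK0] at hmem
            simp at hmem
          have := hs x hx
          simpa [asc, hnt] using this
        have IH := ih (j + 1) s hs'
        simp only [rowA, if_pos hguard, if_neg hinter, IH]
        simp only [Prod.mk.injEq]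
        refine ⟨trivial, ?_, ?_⟩
        · refine List.cons_eq_cons.mpr ⟨?_, rfl⟩
          symm
          apply List.filter_eq_self.mpr
          intro y hy
          by_cases hys : y ∈ s
          · have : tgt occ j y = false := by
              rcases Bool.eq_false_or_eq_true (tgt occ j y) with hb | hb
              · have hmem : y ∈ Kset s occ j := by
                  unfold Kset
                  rw [List.mem_filter]
                  exact ⟨hys, hb⟩
                rw [hK0] at hmem
                simp at hmem
              · exact hb
            simp [this]
          · simp [hys]
        · simp [emits, hK0]
    · have hst : s = [] ∨ t = [] := by
        by_contra h
        push Not at h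
        exact hguard ⟨List.length_pos_iff.mpr h.1, List.length_pos_iff.mpr h.2⟩
      have hK0 : Kset s occ j = [] := by
        rcases hst with h | h
        · simp [Kset, h]
        · apply List.filter_eq_nil_iff.mpr
          intro y hy htg
          have := (F1 y hy).mpr htg
          rw [h] at this
          simp at this
      have hs' : ∀ x ∈ s, (occD occ x).reverse = asc x (j + 1) ts := by
        intro x hx
        have hnt : x ∉ t := by
          intro hxt
          have hmem : x ∈ Kset s occ j := by
            unfold Kset
            rw [List.mem_filter]
            exact ⟨hx, (F1 x hx).mp hxt⟩
          rw [hK0] at hmem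
          simp at hmem
        have := hs x hx
        simpa [asc, hnt] using this
      have IH := ih (j + 1) s hs'
      simp only [rowA, if_neg hguard, IH]
      simp only [Prod.mk.injEq]
      refine ⟨trivial, ?_, ?_⟩
      · refine List.cons_eq_cons.mpr ⟨?_, rfl⟩
        symm
        apply List.filter_eq_self.mpr
        intro y hy
        by_cases hys : y ∈ s
        · have : tgt occ j y = false := by
            rcases Bool.eq_false_or_eq_true (tgt occ j y) with hb | hb
            · have hmem : y ∈ Kset s occ j := by
                unfold Kset
                rw [List.mem_filter]
                exact ⟨hys, hb⟩
              rw [hK0] at hmem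
              simp at hmem
            · exact hb
          simp [this]
        · simp [hys]
      · simp [emits, hK0]

-- ---- the B row ----

-- the body of rowB's fold, named for the proofs
def rowStep (st : PySem.Dict Int (List Int) × PySem.Dict Int (List Int) × List Int)
    (x : Int) : PySem.Dict Int (List Int) × PySem.Dict Int (List Int) × List Int :=
  let js := st.1.getD x []
  if js ≠ [] then
    let j := js.getLast!
    (st.1.insert x js.dropLast,
     st.2.1.insert j (PySem.Set.add (st.2.1.getD j []) x), st.2.2)
  else
    (st.1, st.2.1, PySem.Set.add st.2.2 x)

theorem rowB_eq (s : List Int) (occ : PySem.Dict Int (List Int)) :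
    rowB s occ = s.foldl rowStep (occ, PySem.Dict.empty, []) := rfl

theorem rowB_fold_spec :
    ∀ (s : List Int) (occ bk : PySem.Dict Int (List Int)) (rs : List Int), s.Nodup →
    (∀ x ∈ s, ∀ j, x ∉ bk.getD j []) → (∀ x ∈ s, x ∉ rs) →
    (∀ y, (s.foldl rowStep (occ, bk, rs)).1.getD y [] =
        if y ∈ s ∧ occD occ y ≠ [] then (occD occ y).dropLast else occD occ y)
    ∧ (s.foldl rowStep (occ, bk, rs)).2.2 = rs ++ s.filter (fun y => decide (occD occ y = []))
    ∧ (∀ j, (s.foldl rowStep (occ, bk, rs)).2.1.getD j [] = bk.getD j [] ++ Kset s occ j)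
    ∧ (s.foldl rowStep (occ, bk, rs)).2.1.keys =
        PySem.Set.update bk.keys
          (s.filterMap (fun y => if occD occ y = [] then none else some (occD occ y).getLast!)) := by
  intro s
  induction s with
  | nil =>
    intro occ bk rs _ _ _
    refine ⟨fun y => by simp [occD], by simp, fun j => by simp [Kset], by simp [PySem.Set.update]⟩
  | cons x s ih =>
    intro occ bk rs hnd hbk hrs
    have hx_s : x ∉ s := (List.nodup_cons.mp hnd).1
    simp only [List.foldl_cons]
    by_cases hne : occ.getD x [] = []
    · -- rest branch
      have hstep : rowStep (occ, bk, rs) x = (occ, bk, PySem.Set.add rs x) := by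
        simp [rowStep, hne]
      have hadd : PySem.Set.add rs x = rs ++ [x] :=
        PySem.Set.add_of_not_mem (hrs x List.mem_cons_self)
      rw [hstep, hadd]
      have IH := ih occ bk (rs ++ [x]) (List.Nodup.of_cons hnd)
        (fun x' hx' j => hbk x' (List.mem_cons_of_mem _ hx') j)
        (fun x' hx' => by
          intro hmem
          rcases List.mem_append.mp hmem with h | h
          · exact hrs x' (List.mem_cons_of_mem _ hx') h
          · have hxx : x' = x := List.mem_singleton.mp h
            exact hx_s (hxx ▸ hx'))
      refine ⟨?_, ?_, ?_, ?_⟩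
      · intro y
        rw [IH.1 y]
        by_cases hyx : y = x
        · subst hyx
          simp [hx_s, occD, hne]
        · simp [List.mem_cons, hyx]
      · rw [IH.2.1]
        simp only [List.filter_cons]
        rw [if_pos (by simp [occD, hne])]
        simp
      · intro j
        rw [IH.2.2.1 j]
        have hK : Kset (x :: s) occ j = Kset s occ j := by
          unfold Kset
          simp only [List.filter_cons]
          rw [if_neg (by simp [tgt, occD, hne])]
        rw [hK]
      · rw [IH.2.2.2]
        congr 1
        simp only [List.filterMap_cons]
        rw [if_pos (by simp [occD, hne] : occD occ x = [])]
    · -- pop branch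
      have hstep : rowStep (occ, bk, rs) x =
          (occ.insert x (occ.getD x []).dropLast,
           bk.insert ((occ.getD x []).getLast!)
             (PySem.Set.add (bk.getD ((occ.getD x []).getLast!) []) x), rs) := by
        simp [rowStep, hne]
      rw [hstep]
      have hj0 : (occ.getD x []).getLast! = (occ.getD x []).getLast! := rfl
      have hadd : PySem.Set.add (bk.getD ((occ.getD x []).getLast!) []) x =
          bk.getD ((occ.getD x []).getLast!) [] ++ [x] :=
        PySem.Set.add_of_not_mem (hbk x List.mem_cons_self _)
      rw [hadd]
      have hocc1 : ∀ y, (occ.insert x (occ.getD x []).dropLast).getD y [] =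
          if y = x then (occ.getD x []).dropLast else occ.getD y [] := by
        intro y
        rw [PySem.Dict.getD_insert]
      have hbk1 : ∀ j, (bk.insert ((occ.getD x []).getLast!)
            (bk.getD ((occ.getD x []).getLast!) [] ++ [x])).getD j [] =
          if j = (occ.getD x []).getLast! then bk.getD ((occ.getD x []).getLast!) [] ++ [x]
          else bk.getD j [] := by
        intro j
        rw [PySem.Dict.getD_insert]
      have IH := ih (occ.insert x (occ.getD x []).dropLast)
        (bk.insert ((occ.getD x []).getLast!) (bk.getD ((occ.getD x []).getLast!) [] ++ [x])) rs
        (List.Nodup.of_cons hnd)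
        (fun x' hx' j => by
          rw [hbk1 j]
          split
          · intro hmem
            rcases List.mem_append.mp hmem with h | h
            · exact hbk x' (List.mem_cons_of_mem _ hx') _ h
            · have hxx : x' = x := List.mem_singleton.mp h
              exact hx_s (hxx ▸ hx')
          · exact hbk x' (List.mem_cons_of_mem _ hx') j)
        (fun x' hx' => hrs x' (List.mem_cons_of_mem _ hx'))
      have hoccEq : ∀ y ∈ s, occD (occ.insert x (occ.getD x []).dropLast) y = occD occ y := by
        intro y hy
        have hne' : ¬ y = x := fun h => hx_s (h ▸ hy)
        simp only [occD]
        rw [hocc1 y, if_neg hne']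
      have htgtEq : ∀ y ∈ s, ∀ j, tgt (occ.insert x (occ.getD x []).dropLast) j y = tgt occ j y := by
        intro y hy j
        simp only [tgt, hoccEq y hy]
      refine ⟨?_, ?_, ?_, ?_⟩
      · intro y
        rw [IH.1 y]
        by_cases hyx : y = x
        · subst hyx
          rw [if_neg (fun h => hx_s h.1)]
          simp only [occD]
          rw [hocc1 y, if_pos rfl]
          rw [if_pos ⟨List.mem_cons_self, by simpa [occD] using hne⟩]
        · simp only [occD]
          rw [hocc1 y, if_neg hyx]
          by_cases hys : y ∈ s
          · simp [List.mem_cons, hys]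
          · simp [List.mem_cons, hys, hyx]
      · rw [IH.2.1]
        congr 1
        simp only [List.filter_cons]
        rw [if_neg (by simpa [occD] using hne)]
        apply List.filter_congr
        intro y hy
        simp only [occD]
        simp only [occD] at hoccEq
        simp only [hoccEq y hy]
        rfl
      · intro j
        rw [IH.2.2.1 j, hbk1 j]
        have hKs : Kset s (occ.insert x (occ.getD x []).dropLast) j = Kset s occ j := by
          unfold Kset
          apply List.filter_congr
          intro y hy
          exact htgtEq y hy j
        rw [hKs]
        by_cases hjj : j = (occ.getD x []).getLast!
        · subst hjj
          rw [if_pos rfl]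
          have hcons : Kset (x :: s) occ ((occ.getD x []).getLast!) =
              x :: Kset s occ ((occ.getD x []).getLast!) := by
            unfold Kset
            simp only [List.filter_cons]
            rw [if_pos (by simp [tgt, occD, hne])]
          rw [hcons]
          simp
        · rw [if_neg hjj]
          have hcons : Kset (x :: s) occ j = Kset s occ j := by
            unfold Kset
            simp only [List.filter_cons]
            rw [if_neg (by
              simp [tgt, occD, hne]
              rw [← pvGetLast!_def]
              exact fun h => hjj h.symm)]
          rw [hcons]
      · rw [IH.2.2.2]
        have hkeys : (bk.insert ((occ.getD x []).getLast!)
            (bk.getD ((occ.getD x []).getLast!) [] ++ [x])).keys =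
            PySem.Set.add bk.keys ((occ.getD x []).getLast!) := by
          by_cases hc : bk.contains ((occ.getD x []).getLast!) = true
          · rw [PySem.Dict.keys_insert_of_contains bk _ hc,
              PySem.Set.add_of_mem ((PySem.Dict.contains_iff_mem_keys bk _).mp hc)]
          · rw [PySem.Dict.keys_insert_of_not_contains bk _ (by simpa using hc),
              PySem.Set.add_of_not_mem
                (fun h => hc ((PySem.Dict.contains_iff_mem_keys bk _).mpr h))]
        rw [hkeys]
        have hfm : s.filterMap (fun y =>
            if occD (occ.insert x (occ.getD x []).dropLast) y = [] then none
            else some (occD (occ.insert x (occ.getD x []).dropLast) y).getLast!) =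
            s.filterMap (fun y => if occD occ y = [] then none else some (occD occ y).getLast!) := by
          apply List.filterMap_congr
          intro y hy
          rw [hoccEq y hy]
        rw [hfm]
        simp only [List.filterMap_cons]
        rw [if_neg (by simpa [occD] using hne : ¬ occD occ x = [])]
        rw [PySem.Set.update_cons]
        rfl

-- ---- one full row: rowB's emitted groups are A's ----

theorem row_eq (s : List Int) (occ : PySem.Dict Int (List Int)) (b : List (List Int))
    (hnd : s.Nodup) (hs : ∀ x, (occD occ x).reverse = asc x 0 b) :
    ((PySem.List.sorted (rowB s occ).2.1.keys (fun j => j) false).map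
        (fun j => (rowB s occ).2.1.getD j []) = emits s occ 0 b)
    ∧ (rowB s occ).2.2 = s.filter (fun y => decide (occD occ y = []))
    ∧ (∀ y, (rowB s occ).1.getD y [] =
        if y ∈ s ∧ occD occ y ≠ [] then (occD occ y).dropLast else occD occ y) := by
  rw [rowB_eq]
  have H := rowB_fold_spec s occ PySem.Dict.empty [] hnd
    (fun x _ j => by simp) (fun x _ => by simp)
  refine ⟨?_, by rw [H.2.1]; simp, H.1⟩
  have hKex : ∀ k, Kset s occ k ≠ [] ↔ ∃ y ∈ s, tgt occ k y = true := by
    intro k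
    unfold Kset
    constructor
    · intro h
      by_contra hc
      push Not at hc
      exact h (List.filter_eq_nil_iff.mpr (fun a ha => by simp [hc a ha]))
    · rintro ⟨y, hy, ht⟩ h
      have hmem : y ∈ List.filter (tgt occ k) s := List.mem_filter.mpr ⟨hy, ht⟩
      rw [h] at hmem
      simp at hmem
  have hbound : ∀ k, Kset s occ k ≠ [] → 0 ≤ k ∧ k < 0 + (b.length : Int) := by
    intro k hk
    obtain ⟨y, hy, ht⟩ := (hKex k).mp hk
    simp only [tgt, decide_eq_true_eq] at ht
    have hkmem : k ∈ occD occ y := ht.2 ▸ pvGetLast!_mem _ ht.1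
    have hasc : k ∈ asc y 0 b := by
      rw [← hs y]
      simpa using hkmem
    have := asc_bounds b y 0 k hasc
    omega
  have hmemFM : ∀ k, (k ∈ s.filterMap (fun y => if occD occ y = [] then none
      else some (occD occ y).getLast!)) ↔ ∃ y ∈ s, tgt occ k y = true := by
    intro k
    rw [List.mem_filterMap]
    constructor
    · rintro ⟨y, hy, hf⟩
      by_cases h0 : occD occ y = []
      · simp [h0] at hf
      · rw [if_neg h0] at hf
        have hf' : (occD occ y).getLast! = k := Option.some.inj hf
        refine ⟨y, hy, ?_⟩
        simp [tgt, h0]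
        rw [← pvGetLast!_def]
        exact hf'
    · rintro ⟨y, hy, ht⟩
      simp only [tgt, decide_eq_true_eq] at ht
      refine ⟨y, hy, ?_⟩
      rw [if_neg ht.1]
      exact congrArg some ht.2
  have hkeys : (List.foldl rowStep (occ, PySem.Dict.empty, []) s).2.1.keys =
      PySem.Set.ofList (s.filterMap (fun y => if occD occ y = [] then none
        else some (occD occ y).getLast!)) := by
    rw [H.2.2.2, PySem.Dict.keys_empty, PySem.Set.update_nil_left]
  have hnodupK : (keysL s occ 0 b).Nodup :=
    (keysL_pairwise s occ b 0).imp (fun h => ne_of_lt h)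
  have hpermKeys : (keysL s occ 0 b).Perm (PySem.Set.ofList
      (s.filterMap (fun y => if occD occ y = [] then none
        else some (occD occ y).getLast!))) := by
    apply (List.perm_ext_iff_of_nodup hnodupK (PySem.Set.nodup_ofList _)).mpr
    intro k
    rw [mem_keysL s occ b 0 k, PySem.Set.mem_ofList, hmemFM k, ← hKex k]
    constructor
    · rintro ⟨h, -⟩
      exact h
    · intro h
      have hb := hbound k h
      exact ⟨h, by omega, by omega⟩
  have hsorted : PySem.List.sorted
      ((List.foldl rowStep (occ, PySem.Dict.empty, []) s).2.1.keys) (fun j => j) false =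
      keysL s occ 0 b := by
    rw [hkeys]
    exact PySem.List.sorted_eq_of_perm_of_pairwise_lt _ _ _ hpermKeys (keysL_pairwise s occ b 0)
  rw [hsorted, emits_eq_map_keysL]
  apply List.map_congr_left
  intro k hk
  rw [H.2.2.1 k]
  simp

-- ---- peel matches the new residual ----

theorem peel_residF (s : List Int) (occ occ' : PySem.Dict Int (List Int))
    (hnodup : ∀ y, (occD occ y).Nodup)
    (hocc' : ∀ y, occD occ' y =
      if y ∈ s ∧ occD occ y ≠ [] then (occD occ y).dropLast else occD occ y) :
    ∀ (ts : List (List Int)) (j : Int),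
    peel s occ j (residF occ j ts) = residF occ' j ts := by
  intro ts
  induction ts with
  | nil => intro j; simp [peel, residF]
  | cons t ts ih =>
    intro j
    simp only [peel, residF, ih (j + 1)]
    refine List.cons_eq_cons.mpr ⟨?_, rfl⟩
    rw [List.filter_filter]
    apply List.filter_congr
    intro y _
    have hnd := hnodup y
    simp only [occD] at hnd
    have h' := hocc' y
    simp only [occD] at h'
    by_cases hys : y ∈ s
    · by_cases hne : occ.getD y [] = []
      · rw [if_neg (by simp [hne])] at h'
        rw [h']
        have : tgt occ j y = false := by simp [tgt, occD, hne]
        simp [hne, this]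
      · rw [if_pos ⟨hys, hne⟩] at h'
        rw [h']
        have hmem := pvMem_dropLast_iff (occ.getD y []) hnd hne j
        by_cases hj : j ∈ occ.getD y []
        · by_cases hlast : (occ.getD y []).getLast! = j
          · have htg : tgt occ j y = true := by
              simp [tgt, occD, hne]
              rw [← pvGetLast!_def]
              exact hlast
            have : j ∉ (occ.getD y []).dropLast := by
              rw [hmem]
              rintro ⟨-, hne2⟩
              exact hne2 hlast.symm
            simp [hys, htg, hj, this]
          · have htg : tgt occ j y = false := by
              simp [tgt, occD, hne]
              rw [← pvGetLast!_def]
              exact hlast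
            have : j ∈ (occ.getD y []).dropLast := by
              rw [hmem]
              exact ⟨hj, fun h => hlast h.symm⟩
            simp [hys, htg, hj, this]
        · have : j ∉ (occ.getD y []).dropLast := by
            rw [hmem]
            rintro ⟨hc, -⟩
            exact hj hc
          simp [hj, this]
    · rw [if_neg (by simp [hys])] at h'
      rw [h']
      simp [hys]

-- ---- main loop ----

theorem main_spec (B : List (List Int)) :
    ∀ (a : List (List Int)) (occ : PySem.Dict Int (List Int)) (b : List (List Int)),
    (∀ s ∈ a, s.Nodup) → I1 B occ → b = residF occ 0 B →
    (mainB a occ).2.1 = (mainA a b).2.2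
    ∧ (mainB a occ).2.2 = (mainA a b).1.filter (fun s => 0 < s.length)
    ∧ (mainA a b).2.1 = residF (mainB a occ).1 0 B
    ∧ I1 B (mainB a occ).1 := by
  intro a
  induction a with
  | nil =>
    intro occ b _ h1 h2
    exact ⟨rfl, rfl, by simpa [mainA, mainB] using h2, h1⟩
  | cons s rest ih =>
    intro occ b hnd h1 h2
    have hsnd : s.Nodup := hnd s List.mem_cons_self
    have hs : ∀ x, (occD occ x).reverse = asc x 0 b := by
      intro x
      rw [h2]
      exact hs_of_inv h1 x
    have hrowA := rowA_spec occ b 0 s (fun x _ => hs x)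
    have hrow := row_eq s occ b hsnd hs
    have hocc1 : ∀ y, occD (rowB s occ).1 y =
        if y ∈ s ∧ occD occ y ≠ [] then (occD occ y).dropLast else occD occ y := by
      intro y
      simpa [occD] using hrow.2.2 y
    have hI1' : I1 B (rowB s occ).1 := by
      intro x
      obtain ⟨pre, hpre⟩ := h1 x
      rw [hocc1 x]
      by_cases hcond : x ∈ s ∧ occD occ x ≠ []
      · rw [if_pos hcond]
        refine ⟨pre ++ [(occD occ x).getLast!], ?_⟩
        rw [hpre]
        have hrev : (occD occ x).reverse =
            (occD occ x).getLast! :: (occD occ x).dropLast.reverse := by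
          conv_lhs => rw [← pvConcat_getLast! _ hcond.2]
          simp
        rw [hrev]
        simp
      · rw [if_neg hcond]
        exact ⟨pre, hpre⟩
    have hnodups : ∀ y, (occD occ y).Nodup := occD_nodup h1
    have hb' : peel s occ 0 b = residF (rowB s occ).1 0 B := by
      rw [h2]
      exact peel_residF s occ (rowB s occ).1 hnodups hocc1 B 0
    have IH := ih (rowB s occ).1 (peel s occ 0 b)
      (fun t ht => hnd t (List.mem_cons_of_mem _ ht)) hI1' hb'
    have hA : mainA (s :: rest) b =
        ((s.filter (fun y => decide (occD occ y = []))) :: (mainA rest (peel s occ 0 b)).1,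
         (mainA rest (peel s occ 0 b)).2.1,
         emits s occ 0 b ++ (mainA rest (peel s occ 0 b)).2.2) := by
      simp only [mainA, hrowA]
    have hB : mainB (s :: rest) occ =
        ((mainB rest (rowB s occ).1).1,
         ((PySem.List.sorted (rowB s occ).2.1.keys (fun j => j) false).map
            (fun j => (rowB s occ).2.1.getD j [])) ++ (mainB rest (rowB s occ).1).2.1,
         (if 0 < (rowB s occ).2.2.length then [(rowB s occ).2.2] else []) ++
           (mainB rest (rowB s occ).1).2.2) := by
      simp only [mainB]
    refine ⟨?_, ?_, ?_, ?_⟩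
    · rw [hA, hB]
      simp only
      rw [hrow.1, IH.1]
    · rw [hA, hB]
      simp only
      rw [hrow.2.1, IH.2.1, List.filter_cons]
      by_cases hlen : 0 < (s.filter (fun y => decide (occD occ y = []))).length
      · rw [if_pos hlen, if_pos (by simpa using hlen)]
        simp
      · rw [if_neg hlen, if_neg (by simpa using hlen)]
        simp
    · rw [hA, hB]
      simp only
      exact IH.2.2.1
    · rw [hB]
      simp only
      exact IH.2.2.2

-- ---- building the index ----

theorem inner_fold_getD (t : List Int) :
    ∀ (occ : PySem.Dict Int (List Int)) (j y : Int), t.Nodup →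
    ((t.foldl (fun d x => d.insert x (d.getD x [] ++ [j])) occ).getD y []) =
      occ.getD y [] ++ (if y ∈ t then [j] else []) := by
  induction t with
  | nil => intro occ j y _; simp
  | cons a t ih =>
    intro occ j y hnd
    simp only [List.foldl_cons]
    rw [ih _ j y (List.Nodup.of_cons hnd)]
    by_cases hya : y = a
    · subst hya
      have hnt : y ∉ t := (List.nodup_cons.mp hnd).1
      simp [hnt]
    · simp [PySem.Dict.getD_insert, hya, List.mem_cons]

theorem buildOcc_getD : ∀ (ts : List (List Int)) (j : Int) (occ : PySem.Dict Int (List Int))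
    (y : Int), (∀ t ∈ ts, t.Nodup) →
    (buildOcc ts j occ).getD y [] = occ.getD y [] ++ asc y j ts := by
  intro ts
  induction ts with
  | nil => intro j occ y _; simp [buildOcc, asc]
  | cons t ts ih =>
    intro j occ y hnd
    simp only [buildOcc]
    rw [ih (j + 1) _ y (fun t' ht' => hnd t' (List.mem_cons_of_mem _ ht'))]
    rw [inner_fold_getD t _ j y (hnd t List.mem_cons_self)]
    simp [asc, List.append_assoc]

theorem buildOcc_keys_nodup : ∀ (ts : List (List Int)) (j : Int)
    (occ : PySem.Dict Int (List Int)), occ.keys.Nodup → (buildOcc ts j occ).keys.Nodup := by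
  intro ts
  induction ts with
  | nil => intro j occ h; exact h
  | cons t ts ih =>
    intro j occ h
    exact ih (j + 1) _ (PySem.Dict.nodup_keys_foldl_insert t _ occ h)

theorem revFold_getD : ∀ (ks : List Int), ks.Nodup → ∀ (d : PySem.Dict Int (List Int)) (y : Int),
    ((ks.foldl (fun d x => d.insert x (d.getD x []).reverse) d).getD y []) =
      if y ∈ ks then (d.getD y []).reverse else d.getD y [] := by
  intro ks
  induction ks with
  | nil => intro _ d y; simp
  | cons a ks ih =>
    intro hnd d y
    simp only [List.foldl_cons]
    rw [ih (List.Nodup.of_cons hnd) _ y]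
    by_cases hya : y = a
    · subst hya
      have hna : y ∉ ks := (List.nodup_cons.mp hnd).1
      simp [hna]
    · simp [PySem.Dict.getD_insert, hya, List.mem_cons]

-- ---- the trailing g2 pass ----

theorem tailsB_eq (occ : PySem.Dict Int (List Int)) :
    ∀ (ts : List (List Int)) (j : Int),
    tailsB ts j occ = (residF occ j ts).filter (fun t => 0 < t.length) := by
  intro ts
  induction ts with
  | nil => intro j; simp [tailsB, residF]
  | cons t ts ih =>
    intro j
    simp only [tailsB, residF, ih (j + 1), List.filter_cons]
    by_cases hlen : 0 < (t.filter (fun x => decide (j ∈ occ.getD x []))).length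
    · simp [hlen]
    · simp [hlen]

-- ===== VERDICT (by name: the statement is the Claim_ definition above) =====
theorem get_sliced_groups_py_spec : Claim_equal_get_sliced_groups_py := by
  unfold Claim_equal_get_sliced_groups_py Spec_get_sliced_groups_py
  intro g1 g2 _
  unfold get_sliced_groups_py get_sliced_groups_py_alt
  simp only
  have hBnd : ∀ t ∈ g2.map PySem.Set.ofList, t.Nodup := by
    intro t ht
    obtain ⟨l, -, rfl⟩ := List.mem_map.mp ht
    exact PySem.Set.nodup_ofList l
  have hocc0 : ∀ y, (buildOcc (g2.map PySem.Set.ofList) 0 PySem.Dict.empty).getD y [] =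
      asc y 0 (g2.map PySem.Set.ofList) := by
    intro y
    have := buildOcc_getD (g2.map PySem.Set.ofList) 0 PySem.Dict.empty y hBnd
    simpa using this
  have hkeysnd : (buildOcc (g2.map PySem.Set.ofList) 0 PySem.Dict.empty).keys.Nodup :=
    buildOcc_keys_nodup (g2.map PySem.Set.ofList) 0 _ PySem.Dict.nodup_keys_empty
  have hocc1 : ∀ y, ((buildOcc (g2.map PySem.Set.ofList) 0 PySem.Dict.empty).keys.foldl
      (fun d x => d.insert x (d.getD x []).reverse)
      (buildOcc (g2.map PySem.Set.ofList) 0 PySem.Dict.empty)).getD y [] =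
      (asc y 0 (g2.map PySem.Set.ofList)).reverse := by
    intro y
    rw [revFold_getD _ hkeysnd _ y]
    by_cases hk : y ∈ (buildOcc (g2.map PySem.Set.ofList) 0 PySem.Dict.empty).keys
    · rw [if_pos hk, hocc0 y]
    · rw [if_neg hk]
      have hcf : (buildOcc (g2.map PySem.Set.ofList) 0 PySem.Dict.empty).contains y = false := by
        rcases Bool.eq_false_or_eq_true
            ((buildOcc (g2.map PySem.Set.ofList) 0 PySem.Dict.empty).contains y) with h | h
        · exact absurd ((PySem.Dict.contains_iff_mem_keys _ _).mp h) hk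
        · exact h
      have h0 : (buildOcc (g2.map PySem.Set.ofList) 0 PySem.Dict.empty).getD y [] = [] :=
        PySem.Dict.getD_of_not_contains _ [] hcf
      have hnil : asc y 0 (g2.map PySem.Set.ofList) = [] := by
        rw [← hocc0 y]
        exact h0
      rw [h0, hnil]
      rfl
  have hI1 : I1 (g2.map PySem.Set.ofList)
      ((buildOcc (g2.map PySem.Set.ofList) 0 PySem.Dict.empty).keys.foldl
        (fun d x => d.insert x (d.getD x []).reverse)
        (buildOcc (g2.map PySem.Set.ofList) 0 PySem.Dict.empty)) := by
    intro x
    refine ⟨[], ?_⟩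
    rw [List.nil_append]
    simp only [occD]
    rw [hocc1 x, List.reverse_reverse]
  have hI2 : g2.map PySem.Set.ofList = residF
      ((buildOcc (g2.map PySem.Set.ofList) 0 PySem.Dict.empty).keys.foldl
        (fun d x => d.insert x (d.getD x []).reverse)
        (buildOcc (g2.map PySem.Set.ofList) 0 PySem.Dict.empty)) 0 (g2.map PySem.Set.ofList) := by
    symm
    apply residF_self
    intro x k hk
    simp only [occD]
    rw [hocc1 x]
    exact List.mem_reverse.mpr hk
  have hAnd : ∀ s ∈ g1.map PySem.Set.ofList, s.Nodup := by
    intro s hsm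
    obtain ⟨l, -, rfl⟩ := List.mem_map.mp hsm
    exact PySem.Set.nodup_ofList l
  have M := main_spec (g2.map PySem.Set.ofList) (g1.map PySem.Set.ofList)
    ((buildOcc (g2.map PySem.Set.ofList) 0 PySem.Dict.empty).keys.foldl
      (fun d x => d.insert x (d.getD x []).reverse)
      (buildOcc (g2.map PySem.Set.ofList) 0 PySem.Dict.empty))
    (g2.map PySem.Set.ofList) hAnd hI1 hI2
  rw [← M.1, ← M.2.1, tailsB_eq, ← M.2.2.1]
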